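-- pv_equiv track=rewrite | github.com/seniorplaza/AUTOCAD | modulos/cubierta.py | _distribuir_correas
-- ===== SOURCE A (Python) =====
-- def _distribuir_correas(config_correas):
--     """
--     Toma un array [c40, c50, c60, c75, c90] y devuelve una lista ordenada simétricamente
--     de menor a mayor hacia el centro.
--     Ej: [4, 3, 0, 0, 0] -> [40, 50, 40, 50, 40, 50, 40]
--     Wait, la regla simétrica exacta para 3x50 y 4x40 es alternando.
--     Vamos a hacerlo simple: menores a los lados, mayores al centro, alternando intercaladamente.
--     """
--     pool = []
--     for val, count in zip([40, 50, 60, 75, 90], config_correas):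
--         pool.extend([val] * count)
--     # Sort descending
--     pool.sort(reverse=True)
--     # Place symmetrically: biggest in middle, next alternating left/right
--     res = [0] * len(pool)
--     left = 0
--     right = len(pool) - 1
--     for i, val in enumerate(pool):
--         if i % 2 == 0:
--             res[(len(pool)//2) + (i//2) * (-1)**((i//2)%2)] = val # Complex alternating
--             pass
--     # A simpler symmetric approach:
--     # We want [40, 50, 40, 50, 40, 50, 40] for [4, 3, 0, 0, 0].
--     # Which is exactly sorted by [40, 40, 40, 40, 50, 50, 50] taking from edges? No.
--     # We want [40, 40, 50, 50, 50, 40, 40] if we have 4x40 and 3x50.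
--     # To get this, we sort the pool and take the biggest ones for the middle.
--     pool.sort() # [40, 40, 40, 40, 50, 50, 50]
--     res2 = []
--     while pool:
--         if pool:
--             res2.insert(0, pool.pop()) # Place biggest at middle (well, first is middle-ish)
--         if pool:
--             res2.append(pool.pop())
--     return res2
-- ===== SOURCE B (Python) =====
-- def _distribuir_correas(config_correas):
--     desc = sorted((v for v, c in zip([40, 50, 60, 75, 90], config_correas) for _ in range(c)),
--                   reverse=True)
--     front, back = [], []
--     for i, v in enumerate(desc):
--         if i % 2 == 0:
--             front.append(v)
--         else:
--             back.append(v)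
--     return front[::-1] + back
-- ===== Notes on version B (the rewrite author's own statement) =====
-- stated objective: faster
-- what changed: B replaces A's while-loop that repeatedly pops from a mutated pool and does list.insert(0, ...) (quadratic) by one sort(reverse=True) followed by a single enumerate pass splitting elements by index parity into two accumulator lists, returned as front[::-1] + back; A's dead symmetric-placement loop is dropped.
import Mathlib
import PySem

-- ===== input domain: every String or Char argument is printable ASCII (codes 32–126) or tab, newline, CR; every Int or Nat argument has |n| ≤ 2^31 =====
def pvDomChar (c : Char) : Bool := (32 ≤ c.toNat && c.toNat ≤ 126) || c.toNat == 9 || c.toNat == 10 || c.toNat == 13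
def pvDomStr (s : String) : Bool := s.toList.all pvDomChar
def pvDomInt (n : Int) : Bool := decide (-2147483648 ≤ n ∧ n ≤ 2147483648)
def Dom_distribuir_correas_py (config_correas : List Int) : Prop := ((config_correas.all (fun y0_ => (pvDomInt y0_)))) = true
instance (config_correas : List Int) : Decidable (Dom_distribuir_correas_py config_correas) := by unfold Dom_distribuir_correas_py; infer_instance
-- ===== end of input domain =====

-- B replaces A's quadratic insert(0)/pop while-loop by a single enumerate pass into two
-- accumulator lists after one reverse-sort (objective: faster, O(n^2) → O(n log n)).

-- ===== PORT A =====
-- the 'while pool:' loop: pop() from the end, insert(0,·) at the front, append at the back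
def loopA (pool res2 : List Int) : List Int :=
  if hp : pool = [] then res2
  else
    let x := pool.getLast hp          -- pool.pop()
    let pool1 := pool.dropLast
    let res1 := x :: res2             -- res2.insert(0, x)
    if hp1 : pool1 = [] then res1
    else loopA pool1.dropLast (res1 ++ [pool1.getLast hp1])   -- res2.append(pool.pop())
termination_by pool.length
decreasing_by
  have : pool ≠ [] := hp
  have : 0 < pool.length := List.length_pos_iff.mpr hp
  simp [List.length_dropLast]; omega

def distribuir_correas_py (config_correas : List Int) : List Int :=
  let pool := (List.zip [40, 50, 60, 75, 90] config_correas).foldl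
      (fun acc vc => acc ++ List.replicate vc.2.toNat vc.1) []     -- pool.extend([val]*count)
  let pool := PySem.List.sorted pool (fun x => x) true             -- pool.sort(reverse=True)
  -- the dead first loop: res is written and then discarded (its index is shown in range,
  -- where pySetD equals Python's res[idx] = val; (-1)**e ported with e = ((i//2)%2) ≥ 0 as Nat)
  let _res := (PySem.List.enumerate pool 0).foldl
      (fun r iv =>
        if PySem.Int.mod iv.1 2 == 0 then
          PySem.List.pySetD r
            (PySem.Int.floordiv (pool.length : Int) 2
              + PySem.Int.floordiv iv.1 2
                * (-1) ^ (PySem.Int.mod (PySem.Int.floordiv iv.1 2) 2).toNat)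
            iv.2
        else r)
      (List.replicate pool.length (0 : Int))
  let pool := PySem.List.sorted pool (fun x => x) false            -- pool.sort()
  loopA pool []

-- ===== PORT B =====
def distribuir_correas_py_alt (config_correas : List Int) : List Int :=
  let desc := PySem.List.sorted
      ((List.zip [40, 50, 60, 75, 90] config_correas).flatMap
        (fun vc => List.replicate vc.2.toNat vc.1))
      (fun x => x) true
  let fb := (PySem.List.enumerate desc 0).foldl
      (fun fb iv =>
        if PySem.Int.mod iv.1 2 == 0 then (fb.1 ++ [iv.2], fb.2)
        else (fb.1, fb.2 ++ [iv.2]))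
      ([], [])
  ((PySem.List.slice? fb.1 none none (-1)).getD []) ++ fb.2        -- front[::-1] + back

-- ===== PRECONDITION & SPEC =====
def Spec_distribuir_correas_py (config_correas : List Int) (out : List Int) : Prop := out = distribuir_correas_py_alt config_correas
instance (config_correas : List Int) (out : List Int) : Decidable (Spec_distribuir_correas_py config_correas out) := by unfold Spec_distribuir_correas_py; infer_instance

-- ===== CLAIM (what is proved, stated in full; the proofs are below) =====
def Claim_equal_distribuir_correas_py : Prop := ∀ (config_correas : List Int), Dom_distribuir_correas_py config_correas → Spec_distribuir_correas_py config_correas (distribuir_correas_py config_correas)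

-- ===== LEMMAS AND PROOFS =====
-- elements of a descending list at even / odd positions
mutual
def evens : List Int → List Int
  | [] => []
  | x :: xs => x :: odds xs
def odds : List Int → List Int
  | [] => []
  | _ :: xs => evens xs
end

-- A's while-loop, run on the reverse of a list d, peels d front-to-back:
-- even-indexed elements pile up (reversed) in front, odd-indexed ones append at the back
theorem loopA_eq (d res : List Int) :
    loopA d.reverse res = (evens d).reverse ++ res ++ odds d := by
  match d with
  | [] => simp [loopA, evens, odds]
  | [x] => simp [loopA, evens, odds]
  | x :: y :: xs =>
    have ih := loopA_eq xs (x :: res ++ [y])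
    have h1 : (x :: y :: xs).reverse = (xs.reverse ++ [y]) ++ [x] := by simp
    rw [h1, loopA]
    rw [dif_neg (by simp)]
    simp only [List.getLast_concat, List.dropLast_concat]
    rw [dif_neg (by simp)]
    rw [ih]
    simp [evens, odds]

-- B's enumerate loop splits by index parity
theorem foldB_eq (d : List Int) : ∀ (s : Int) (f b : List Int), 0 ≤ s →
    (PySem.List.enumerate d s).foldl
      (fun fb iv =>
        if PySem.Int.mod iv.1 2 == 0 then (fb.1 ++ [iv.2], fb.2)
        else (fb.1, fb.2 ++ [iv.2]))
      (f, b)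
    = if s % 2 = 0 then (f ++ evens d, b ++ odds d) else (f ++ odds d, b ++ evens d) := by
  induction d with
  | nil => intro s f b hs; split <;> simp [PySem.List.enumerate_nil, evens, odds]
  | cons x xs ih =>
    intro s f b hs
    rw [PySem.List.enumerate_cons, List.foldl_cons]
    by_cases h : s % 2 = 0
    · rw [if_pos (by simp [h])]
      rw [ih (s + 1) (f ++ [x]) b (by omega)]
      rw [if_neg (by omega), if_pos h]
      simp [evens, odds]
    · rw [if_neg (by simp [h])]
      rw [ih (s + 1) f (b ++ [x]) (by omega)]
      rw [if_pos (by omega), if_neg h]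
      simp [evens, odds]

-- ascending sort is the reverse of the descending sort (identity key, Int)
theorem sorted_false_eq_reverse_sorted_true (xs : List Int) :
    PySem.List.sorted xs (fun x => x) false = (PySem.List.sorted xs (fun x => x) true).reverse := by
  apply List.Perm.eq_of_pairwise (le := (· ≤ ·)) (fun a b _ _ h1 h2 => le_antisymm h1 h2)
  · exact PySem.List.sorted_pairwise xs (fun x => x)
  · exact List.pairwise_reverse.mpr (PySem.List.sorted_pairwise_rev xs (fun x => x))
  · exact (PySem.List.sorted_perm xs (fun x => x) false).trans
      ((PySem.List.sorted_perm xs (fun x => x) true).symm.trans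
        (List.reverse_perm _).symm)

-- ===== VERDICT (by name: the statement is the Claim_ definition above) =====
theorem distribuir_correas_py_spec : Claim_equal_distribuir_correas_py := by
  intro cfg _
  unfold Spec_distribuir_correas_py distribuir_correas_py distribuir_correas_py_alt
  simp only []
  rw [PySem.List.foldl_append_eq_flatMap]
  simp only [List.nil_append]
  set pool := (List.zip ([40, 50, 60, 75, 90] : List Int) cfg).flatMap (fun vc => List.replicate vc.2.toNat vc.1) with hpool
  set d := PySem.List.sorted pool (fun x => x) true with hd
  have hsorts : PySem.List.sorted d (fun x => x) false = PySem.List.sorted pool (fun x => x) false :=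
    PySem.List.sorted_eq_sorted_of_perm _ _ _ (fun a b h => h) (PySem.List.sorted_perm _ _ _)
  rw [hsorts, sorted_false_eq_reverse_sorted_true, ← hd]
  rw [loopA_eq d []]
  rw [foldB_eq d 0 [] [] (by omega)]
  simp [PySem.List.slice?_none_none_neg_one]
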